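-- pv_equiv track=rewrite | github.com/pypi-data/pypi-mirror-361 | packages/ctfatsegment/ctfatsegment-0.2.0-py3-none-any.whl/ctfatsegment2/ctfat_segment.py | smoothBottomBorder
-- ===== SOURCE A (Python) =====
-- import copy
--
-- def smoothBottomBorder(border):
--     rows = []
--     row = []
--     for i in range(0, len(border)-1):
--         if border[i][1] > border[i+1][1] - 8 and border[i][1] < border[i+1][1] + 8:
--             row.append(border[i])
--             if i == len(border)-2:
--                 row.append(border[i+1])
--                 c = copy.deepcopy(row)
--                 rows.append(c)
--         else:
--             row.append(border[i])
--             c = copy.deepcopy(row)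
--             rows.append(c)
--             row.clear()
--
--     #serie = max(rows, key=len)
--
--     smoothedRows = []
--
--     for i in range(len(rows)-1):
--         if rows[i][-1][1] < (rows[i+1][0][1] + 30):
--             smoothedRows.append(rows[i])
--
--     smoothedRows.append(rows[-1])
--
--     smoothedBorder = []
--     for row in smoothedRows:
--         if len(row) > 4:
--             for point in row:
--                 smoothedBorder.append(point)
--
--     return smoothedBorder
-- ===== SOURCE B (Python) =====
-- def smoothBottomBorder(border):
--     # single fused pass: emit each run into the output the moment it closes,
--     # instead of staging rows -> smoothedRows -> smoothedBorder
--     n = len(border)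
--     out = []
--     run = []
--     for i in range(n - 1):
--         a, b = border[i], border[i + 1]
--         run.append(a)
--         if b[1] - 8 < a[1] < b[1] + 8:
--             if i == n - 2:
--                 run.append(b)
--                 if len(run) > 4:
--                     out.extend(run)
--         else:
--             if len(run) > 4 and (i == n - 2 or a[1] < b[1] + 30):
--                 out.extend(run)
--             run = []
--     return out
-- ===== Notes on version B (the rewrite author's own statement) =====
-- stated objective: alternative
-- what changed: B fuses A's three staged passes (build rows with deepcopy, filter rows against the next row's start, flatten long rows) into one single pass with an accumulator that decides keep/drop and emits each run into the output the moment the run closes, so the intermediate rows and smoothedRows lists never exist.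
import Mathlib
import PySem

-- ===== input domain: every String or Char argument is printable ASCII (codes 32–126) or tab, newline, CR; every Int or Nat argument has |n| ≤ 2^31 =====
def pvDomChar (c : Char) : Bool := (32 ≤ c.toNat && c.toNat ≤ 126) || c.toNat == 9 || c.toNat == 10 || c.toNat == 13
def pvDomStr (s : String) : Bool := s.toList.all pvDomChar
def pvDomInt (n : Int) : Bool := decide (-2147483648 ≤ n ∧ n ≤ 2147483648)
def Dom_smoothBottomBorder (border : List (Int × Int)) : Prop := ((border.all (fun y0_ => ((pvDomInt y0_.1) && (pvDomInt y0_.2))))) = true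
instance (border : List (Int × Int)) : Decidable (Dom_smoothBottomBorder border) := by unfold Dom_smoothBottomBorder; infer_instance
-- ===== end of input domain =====

-- B fuses A's three staged passes into one pass with an accumulator that emits each run into the
-- output as soon as it closes; same return value on every border with at least two points.

-- ===== PORT A =====
-- loop body of A's first pass: state (rows, row), index i over range(len(border)-1)
def pvStepA (border : List (Int × Int)) (st : List (List (Int × Int)) × List (Int × Int)) (i : Int) :
    List (List (Int × Int)) × List (Int × Int) :=
  let bi := PySem.List.pyGetD border i (0, 0)
  let bi1 := PySem.List.pyGetD border (i + 1) (0, 0)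
  if bi.2 > bi1.2 - 8 ∧ bi.2 < bi1.2 + 8 then
    let row := st.2 ++ [bi]
    if i = (border.length : Int) - 2 then (st.1 ++ [row ++ [bi1]], row ++ [bi1])
    else (st.1, row)
  else (st.1 ++ [st.2 ++ [bi]], [])

def smoothBottomBorder (border : List (Int × Int)) : List (Int × Int) :=
  let rows := ((PySem.List.pyRange 0 ((border.length : Int) - 1) 1).foldl (pvStepA border) ([], [])).1
  let smoothedRows := (PySem.List.pyRange 0 ((rows.length : Int) - 1) 1).foldl
    (fun acc i =>
      if (PySem.List.pyGetD (PySem.List.pyGetD rows i []) (-1) ((0 : Int), (0 : Int))).2 <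
         (PySem.List.pyGetD (PySem.List.pyGetD rows (i + 1) []) 0 ((0 : Int), (0 : Int))).2 + 30
      then acc ++ [PySem.List.pyGetD rows i []] else acc) []
  let smoothedRows := smoothedRows ++ [PySem.List.pyGetD rows (-1) []]
  smoothedRows.foldl (fun acc row => if row.length > 4 then acc ++ row else acc) []

-- ===== PORT B =====
-- loop body of B's single fused pass: state (out, run), index i over range(len(border)-1)
def pvStepB (border : List (Int × Int)) (st : List (Int × Int) × List (Int × Int)) (i : Int) :
    List (Int × Int) × List (Int × Int) :=
  let a := PySem.List.pyGetD border i (0, 0)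
  let b := PySem.List.pyGetD border (i + 1) (0, 0)
  let run := st.2 ++ [a]
  if b.2 - 8 < a.2 ∧ a.2 < b.2 + 8 then
    if i = (border.length : Int) - 2 then
      (st.1 ++ (if (run ++ [b]).length > 4 then run ++ [b] else []), run ++ [b])
    else (st.1, run)
  else
    (st.1 ++ (if run.length > 4 ∧ (i = (border.length : Int) - 2 ∨ a.2 < b.2 + 30) then run else []),
     [])

def smoothBottomBorder_alt (border : List (Int × Int)) : List (Int × Int) :=
  ((PySem.List.pyRange 0 ((border.length : Int) - 1) 1).foldl (pvStepB border) ([], [])).1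

-- ===== PRECONDITION & SPEC =====
-- Pre_ excludes borders with fewer than two points, on which Python A raises IndexError at rows[-1].
def Pre_smoothBottomBorder (border : List (Int × Int)) : Prop := 2 ≤ border.length
instance (border : List (Int × Int)) : Decidable (Pre_smoothBottomBorder border) := by unfold Pre_smoothBottomBorder; infer_instance
def pvWitness_smoothBottomBorder : (List (Int × Int)) := [(0, 0), (1, 3), (2, 5)]

def Spec_smoothBottomBorder (border : List (Int × Int)) (out : List (Int × Int)) : Prop := out = smoothBottomBorder_alt border
instance (border : List (Int × Int)) (out : List (Int × Int)) : Decidable (Spec_smoothBottomBorder border out) := by unfold Spec_smoothBottomBorder; infer_instance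

-- ===== CLAIM (what is proved, stated in full; the proofs are below) =====
def Claim_equal_smoothBottomBorder : Prop := ∀ (border : List (Int × Int)), Dom_smoothBottomBorder border → Pre_smoothBottomBorder border → Spec_smoothBottomBorder border (smoothBottomBorder border)

-- ===== LEMMAS AND PROOFS =====

-- the runs A's first pass produces, as a structural recursion over the border
def pvRuns (row : List (Int × Int)) (l : List (Int × Int)) : List (List (Int × Int)) :=
  match l with
  | [] => []
  | [_] => []
  | a :: b :: rest =>
    if b.2 - 8 < a.2 ∧ a.2 < b.2 + 8 then
      if rest = [] then [row ++ [a, b]] else pvRuns (row ++ [a]) (b :: rest)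
    else (row ++ [a]) :: pvRuns [] (b :: rest)
termination_by l.length
decreasing_by all_goals simp

-- the final value of the mutable row/run variable (identical evolution in A and B)
def pvRow (row : List (Int × Int)) (l : List (Int × Int)) : List (Int × Int) :=
  match l with
  | [] => row
  | [_] => row
  | a :: b :: rest =>
    if b.2 - 8 < a.2 ∧ a.2 < b.2 + 8 then
      if rest = [] then row ++ [a, b] else pvRow (row ++ [a]) (b :: rest)
    else pvRow [] (b :: rest)
termination_by l.length
decreasing_by all_goals simp

-- the output B's fused pass produces, as a structural recursion over the border
def pvFused (row : List (Int × Int)) (l : List (Int × Int)) : List (Int × Int) :=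
  match l with
  | [] => []
  | [_] => []
  | a :: b :: rest =>
    if b.2 - 8 < a.2 ∧ a.2 < b.2 + 8 then
      if rest = [] then (if (row ++ [a, b]).length > 4 then row ++ [a, b] else [])
      else pvFused (row ++ [a]) (b :: rest)
    else (if (row ++ [a]).length > 4 ∧ (rest = [] ∨ a.2 < b.2 + 30) then row ++ [a] else [])
      ++ pvFused [] (b :: rest)
termination_by l.length
decreasing_by all_goals simp

-- A's phases 2 and 3 on the run list
def pvFinish (rs : List (List (Int × Int))) : List (Int × Int) :=
  let kept := ((rs.zip (rs.drop 1)).filter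
      (fun p => (PySem.List.pyGetD p.1 (-1) ((0 : Int), (0 : Int))).2 <
                (PySem.List.pyGetD p.2 0 ((0 : Int), (0 : Int))).2 + 30)).map (·.1)
  ((kept ++ [PySem.List.pyGetD rs (-1) []]).filter (fun r => r.length > 4)).flatMap id

lemma pv_getD_of_drop {border : List (Int × Int)} {j : ℕ} {a : Int × Int} {t : List (Int × Int)}
    (h : border.drop j = a :: t) (d : Int × Int) : border.getD j d = a := by
  have h0 : (border.drop j)[0]? = border[j + 0]? := List.getElem?_drop
  have : border[j]? = some a := by simpa [h] using h0.symm
  simp [List.getD, this]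

lemma pv_getD_succ_of_drop {border : List (Int × Int)} {j : ℕ} {a b : Int × Int} {t : List (Int × Int)}
    (h : border.drop j = a :: b :: t) (d : Int × Int) : border.getD (j + 1) d = b := by
  have h0 : (border.drop j)[1]? = border[j + 1]? := List.getElem?_drop
  have : border[j + 1]? = some b := by simpa [h] using h0.symm
  simp [List.getD, this]

lemma pv_foldA (border : List (Int × Int)) :
    ∀ (row : List (Int × Int)) (suffix : List (Int × Int)) (j : ℕ) (rows : List (List (Int × Int))),
    border.drop j = suffix → j + suffix.length = border.length →
    (List.range' j (suffix.length - 1)).foldl (fun st (k : ℕ) => pvStepA border st (k : Int)) (rows, row)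
      = (rows ++ pvRuns row suffix, pvRow row suffix) := by
  intro row suffix
  induction row, suffix using pvRuns.induct with
  | case1 row => intro j rows h1 h2; simp [pvRuns, pvRow]
  | case2 row x => intro j rows h1 h2; simp [pvRuns, pvRow]
  | case3 row a b hs =>
    intro j rows h1 h2
    have ha : border.getD j ((0 : Int), (0 : Int)) = a := pv_getD_of_drop h1 _
    have hb : border.getD (j + 1) ((0 : Int), (0 : Int)) = b := pv_getD_succ_of_drop h1 _
    have hlen : border.length = j + 2 := by simp only [List.length_cons, List.length_nil] at h2; omega
    have hj2 : ((j : ℕ) : Int) = (border.length : Int) - 2 := by rw [hlen]; push_cast; ring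
    have hcast : ((j : ℕ) : Int) + 1 = (((j + 1 : ℕ)) : Int) := by push_cast; ring
    have hrange : ([a, b] : List (Int × Int)).length - 1 = 1 := by simp
    rw [hrange, List.range'_one, List.foldl_cons, List.foldl_nil]
    simp only [pvStepA, hcast, PySem.List.pyGetD_natCast, ha, hb]
    rw [if_pos ⟨hs.1, hs.2⟩, if_pos hj2]
    simp [pvRuns, pvRow, hs]
  | case4 row a b rest hs hr ih =>
    intro j rows h1 h2
    have ha : border.getD j ((0 : Int), (0 : Int)) = a := pv_getD_of_drop h1 _
    have hb : border.getD (j + 1) ((0 : Int), (0 : Int)) = b := pv_getD_succ_of_drop h1 _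
    have h1' : border.drop (j + 1) = b :: rest := by
      have := congrArg List.tail h1
      simpa [List.tail_drop] using this
    have hr1 : 0 < rest.length := List.length_pos_of_ne_nil hr
    have h2' : (j + 1) + (b :: rest).length = border.length := by
      simp only [List.length_cons] at h2 ⊢; omega
    have hlen : border.length = j + rest.length + 2 := by
      rw [← h2]; simp; omega
    have hj2 : ((j : ℕ) : Int) ≠ (border.length : Int) - 2 := by
      rw [hlen]; push_cast; omega
    have hcast : ((j : ℕ) : Int) + 1 = (((j + 1 : ℕ)) : Int) := by push_cast; ring
    have hstep : pvStepA border (rows, row) ((j : ℕ) : Int) = (rows, row ++ [a]) := by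
      simp only [pvStepA, hcast, PySem.List.pyGetD_natCast, ha, hb]
      rw [if_pos ⟨hs.1, hs.2⟩, if_neg hj2]
    have hrange : (a :: b :: rest).length - 1 = ((b :: rest).length - 1) + 1 := by simp
    rw [hrange, List.range'_succ, List.foldl_cons, hstep, ih (j + 1) rows h1' h2']
    simp [pvRuns, pvRow, hs, hr]
  | case5 row a b rest hs ih =>
    intro j rows h1 h2
    have ha : border.getD j ((0 : Int), (0 : Int)) = a := pv_getD_of_drop h1 _
    have hb : border.getD (j + 1) ((0 : Int), (0 : Int)) = b := pv_getD_succ_of_drop h1 _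
    have h1' : border.drop (j + 1) = b :: rest := by
      have := congrArg List.tail h1
      simpa [List.tail_drop] using this
    have h2' : (j + 1) + (b :: rest).length = border.length := by
      simp only [List.length_cons] at h2 ⊢; omega
    have hcast : ((j : ℕ) : Int) + 1 = (((j + 1 : ℕ)) : Int) := by push_cast; ring
    have hstep : pvStepA border (rows, row) ((j : ℕ) : Int) = (rows ++ [row ++ [a]], []) := by
      simp only [pvStepA, hcast, PySem.List.pyGetD_natCast, ha, hb]
      rw [if_neg hs]
    have hrange : (a :: b :: rest).length - 1 = ((b :: rest).length - 1) + 1 := by simp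
    rw [hrange, List.range'_succ, List.foldl_cons, hstep, ih (j + 1) (rows ++ [row ++ [a]]) h1' h2']
    simp [pvRuns, pvRow, hs]

lemma pv_foldB (border : List (Int × Int)) :
    ∀ (row : List (Int × Int)) (suffix : List (Int × Int)) (j : ℕ) (out : List (Int × Int)),
    border.drop j = suffix → j + suffix.length = border.length →
    (List.range' j (suffix.length - 1)).foldl (fun st (k : ℕ) => pvStepB border st (k : Int)) (out, row)
      = (out ++ pvFused row suffix, pvRow row suffix) := by
  intro row suffix
  induction row, suffix using pvRuns.induct with
  | case1 row => intro j out h1 h2; simp [pvFused, pvRow]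
  | case2 row x => intro j out h1 h2; simp [pvFused, pvRow]
  | case3 row a b hs =>
    intro j out h1 h2
    have ha : border.getD j ((0 : Int), (0 : Int)) = a := pv_getD_of_drop h1 _
    have hb : border.getD (j + 1) ((0 : Int), (0 : Int)) = b := pv_getD_succ_of_drop h1 _
    have hlen : border.length = j + 2 := by simp only [List.length_cons, List.length_nil] at h2; omega
    have hj2 : ((j : ℕ) : Int) = (border.length : Int) - 2 := by rw [hlen]; push_cast; ring
    have hcast : ((j : ℕ) : Int) + 1 = (((j + 1 : ℕ)) : Int) := by push_cast; ring
    have hrange : ([a, b] : List (Int × Int)).length - 1 = 1 := by simp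
    rw [hrange, List.range'_one, List.foldl_cons, List.foldl_nil]
    simp only [pvStepB, hcast, PySem.List.pyGetD_natCast, ha, hb]
    rw [if_pos ⟨hs.1, hs.2⟩, if_pos hj2]
    simp [pvFused, pvRow, hs]
  | case4 row a b rest hs hr ih =>
    intro j out h1 h2
    have ha : border.getD j ((0 : Int), (0 : Int)) = a := pv_getD_of_drop h1 _
    have hb : border.getD (j + 1) ((0 : Int), (0 : Int)) = b := pv_getD_succ_of_drop h1 _
    have h1' : border.drop (j + 1) = b :: rest := by
      have := congrArg List.tail h1
      simpa [List.tail_drop] using this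
    have hr1 : 0 < rest.length := List.length_pos_of_ne_nil hr
    have h2' : (j + 1) + (b :: rest).length = border.length := by
      simp only [List.length_cons] at h2 ⊢; omega
    have hlen : border.length = j + rest.length + 2 := by
      rw [← h2]; simp; omega
    have hj2 : ((j : ℕ) : Int) ≠ (border.length : Int) - 2 := by
      rw [hlen]; push_cast; omega
    have hcast : ((j : ℕ) : Int) + 1 = (((j + 1 : ℕ)) : Int) := by push_cast; ring
    have hstep : pvStepB border (out, row) ((j : ℕ) : Int) = (out, row ++ [a]) := by
      simp only [pvStepB, hcast, PySem.List.pyGetD_natCast, ha, hb]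
      rw [if_pos ⟨hs.1, hs.2⟩, if_neg hj2]
    have hrange : (a :: b :: rest).length - 1 = ((b :: rest).length - 1) + 1 := by simp
    rw [hrange, List.range'_succ, List.foldl_cons, hstep, ih (j + 1) out h1' h2']
    simp [pvFused, pvRow, hs, hr]
  | case5 row a b rest hs ih =>
    intro j out h1 h2
    have ha : border.getD j ((0 : Int), (0 : Int)) = a := pv_getD_of_drop h1 _
    have hb : border.getD (j + 1) ((0 : Int), (0 : Int)) = b := pv_getD_succ_of_drop h1 _
    have h1' : border.drop (j + 1) = b :: rest := by
      have := congrArg List.tail h1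
      simpa [List.tail_drop] using this
    have h2' : (j + 1) + (b :: rest).length = border.length := by
      simp only [List.length_cons] at h2 ⊢; omega
    have hlen : border.length = j + rest.length + 2 := by
      rw [← h2]; simp; omega
    have hiff : (((j : ℕ) : Int) = (border.length : Int) - 2) ↔ rest = [] := by
      rw [← List.length_eq_zero_iff, hlen]; push_cast; omega
    have hcast : ((j : ℕ) : Int) + 1 = (((j + 1 : ℕ)) : Int) := by push_cast; ring
    have hstep : pvStepB border (out, row) ((j : ℕ) : Int)
        = (out ++ (if (row ++ [a]).length > 4 ∧ (rest = [] ∨ a.2 < b.2 + 30) then row ++ [a] else []),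
           []) := by
      simp only [pvStepB, hcast, PySem.List.pyGetD_natCast, ha, hb]
      rw [if_neg hs]
      simp only [hiff]
    have hrange : (a :: b :: rest).length - 1 = ((b :: rest).length - 1) + 1 := by simp
    rw [hrange, List.range'_succ, List.foldl_cons, hstep,
      ih (j + 1) (out ++ (if (row ++ [a]).length > 4 ∧ (rest = [] ∨ a.2 < b.2 + 30) then row ++ [a] else [])) h1' h2']
    simp [pvFused, pvRow, hs]

lemma pv_phase3 (l : List (List (Int × Int))) :
    ∀ acc, l.foldl (fun acc row => if row.length > 4 then acc ++ row else acc) acc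
      = acc ++ (l.filter (fun r => r.length > 4)).flatMap id := by
  induction l with
  | nil => simp
  | cons x xs ih =>
    intro acc
    by_cases hx : x.length > 4 <;> simp [List.foldl_cons, hx, ih]

lemma pv_zip_pairs (rs : List (List (Int × Int))) :
    (List.range (rs.length - 1)).map (fun k => (rs.getD k [], rs.getD (k + 1) []))
      = rs.zip (rs.drop 1) := by
  apply List.ext_getElem
  · simp [List.length_zip]
  · intro k h1 h2
    have hk : k < rs.length - 1 := by simpa using h1
    have hk1 : k + 1 < rs.length := by omega
    simp [List.getElem_zip, List.getD_eq_getElem?_getD, hk1,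
      (by omega : k < rs.length)]

lemma pv_phase2 (rs : List (List (Int × Int))) :
    (PySem.List.pyRange 0 ((rs.length : Int) - 1) 1).foldl
      (fun acc i =>
        if (PySem.List.pyGetD (PySem.List.pyGetD rs i []) (-1) ((0 : Int), (0 : Int))).2 <
           (PySem.List.pyGetD (PySem.List.pyGetD rs (i + 1) []) 0 ((0 : Int), (0 : Int))).2 + 30
        then acc ++ [PySem.List.pyGetD rs i []] else acc) []
      = ((rs.zip (rs.drop 1)).filter
          (fun p => (PySem.List.pyGetD p.1 (-1) ((0 : Int), (0 : Int))).2 <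
                    (PySem.List.pyGetD p.2 0 ((0 : Int), (0 : Int))).2 + 30)).map (·.1) := by
  rw [PySem.List.pyRange_one]
  have ht : (((rs.length : Int) - 1) - 0).toNat = rs.length - 1 := by omega
  rw [ht, List.foldl_map]
  simp only [zero_add]
  have hc : ∀ k : ℕ, ((k : ℕ) : Int) + 1 = (((k + 1 : ℕ)) : Int) := by
    intro k; push_cast; ring
  simp only [hc, PySem.List.pyGetD_natCast]
  rw [PySem.List.foldl_append_ite
    (p := fun k : ℕ => (PySem.List.pyGetD (rs.getD k []) (-1) ((0 : Int), (0 : Int))).2 <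
      (PySem.List.pyGetD (rs.getD (k + 1) []) 0 ((0 : Int), (0 : Int))).2 + 30)
    (f := fun k : ℕ => rs.getD k [])]
  rw [← pv_zip_pairs rs, List.filter_map, List.map_map]
  simp [Function.comp_def]

lemma pv_A_eval (border : List (Int × Int)) :
    smoothBottomBorder border = pvFinish (pvRuns [] border) := by
  have hrows : ((PySem.List.pyRange 0 ((border.length : Int) - 1) 1).foldl
      (pvStepA border) ([], [])).1 = pvRuns [] border := by
    rw [PySem.List.pyRange_one]
    have ht : (((border.length : Int) - 1) - 0).toNat = border.length - 1 := by omega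
    rw [ht, List.foldl_map]
    simp only [zero_add]
    rw [List.range_eq_range']
    rw [pv_foldA border [] border 0 [] List.drop_zero (by simp)]
    simp
  simp only [smoothBottomBorder]
  rw [hrows, pv_phase2 (pvRuns [] border), pv_phase3]
  simp [pvFinish]

lemma pv_B_eval (border : List (Int × Int)) :
    smoothBottomBorder_alt border = pvFused [] border := by
  simp only [smoothBottomBorder_alt]
  rw [PySem.List.pyRange_one]
  have ht : (((border.length : Int) - 1) - 0).toNat = border.length - 1 := by omega
  rw [ht, List.foldl_map]
  simp only [zero_add]
  rw [List.range_eq_range']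
  rw [pv_foldB border [] border 0 [] List.drop_zero (by simp)]
  simp

-- one-step unfolding lemmas for the recursive definitions
lemma pvRuns_nil (row : List (Int × Int)) : pvRuns row [] = [] := by rw [pvRuns]
lemma pvRuns_one (row : List (Int × Int)) (x : Int × Int) : pvRuns row [x] = [] := by rw [pvRuns]
lemma pvRuns_cons (row : List (Int × Int)) (a b : Int × Int) (rest : List (Int × Int)) :
    pvRuns row (a :: b :: rest)
      = if b.2 - 8 < a.2 ∧ a.2 < b.2 + 8 then
          if rest = [] then [row ++ [a, b]] else pvRuns (row ++ [a]) (b :: rest)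
        else (row ++ [a]) :: pvRuns [] (b :: rest) := by rw [pvRuns]
lemma pvFused_one (row : List (Int × Int)) (x : Int × Int) : pvFused row [x] = [] := by rw [pvFused]
lemma pvFused_cons (row : List (Int × Int)) (a b : Int × Int) (rest : List (Int × Int)) :
    pvFused row (a :: b :: rest)
      = if b.2 - 8 < a.2 ∧ a.2 < b.2 + 8 then
          if rest = [] then (if (row ++ [a, b]).length > 4 then row ++ [a, b] else [])
          else pvFused (row ++ [a]) (b :: rest)
        else (if (row ++ [a]).length > 4 ∧ (rest = [] ∨ a.2 < b.2 + 30) then row ++ [a] else [])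
          ++ pvFused [] (b :: rest) := by rw [pvFused]

-- every run produced from a border with at least two points starts with row ++ first point
lemma pv_runs_shape :
    ∀ (t : List (Int × Int)) (row : List (Int × Int)) (a b : Int × Int),
    ∃ s rs, pvRuns row (a :: b :: t) = (row ++ a :: s) :: rs := by
  intro t
  induction t with
  | nil =>
    intro row a b
    by_cases hs : b.2 - 8 < a.2 ∧ a.2 < b.2 + 8
    · exact ⟨[b], [], by rw [pvRuns_cons, if_pos hs, if_pos rfl]⟩
    · exact ⟨[], pvRuns [] [b], by rw [pvRuns_cons, if_neg hs]⟩
  | cons c t' ih =>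
    intro row a b
    by_cases hs : b.2 - 8 < a.2 ∧ a.2 < b.2 + 8
    · obtain ⟨s, rs, h⟩ := ih (row ++ [a]) b c
      refine ⟨b :: s, rs, ?_⟩
      rw [pvRuns_cons, if_pos hs, if_neg (by simp), h]
      simp
    · exact ⟨[], pvRuns [] (b :: c :: t'), by rw [pvRuns_cons, if_neg hs]⟩

-- pvFinish on a singleton run list: the run is kept iff it is long
lemma pv_finish_singleton (r : List (Int × Int)) :
    pvFinish [r] = if r.length > 4 then r else [] := by
  have h1 : ([r] : List (List (Int × Int))) ≠ [] := by simp
  by_cases hl : r.length > 4 <;>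
    simp [pvFinish, PySem.List.pyGetD_neg_one _ _ h1, hl]

-- pvFinish on a cons with a nonempty tail peels off one keep/drop decision
lemma pv_finish_cons (r h : List (Int × Int)) (t : List (List (Int × Int))) :
    pvFinish (r :: h :: t)
      = (if r.length > 4 ∧ (PySem.List.pyGetD r (-1) ((0 : Int), (0 : Int))).2 <
            (PySem.List.pyGetD h 0 ((0 : Int), (0 : Int))).2 + 30 then r else [])
        ++ pvFinish (h :: t) := by
  simp only [pvFinish, List.drop_succ_cons, List.drop_zero, List.zip_cons_cons]
  have h1 : (r :: h :: t) ≠ [] := by simp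
  have h2 : (h :: t) ≠ [] := by simp
  have hlast : PySem.List.pyGetD (r :: h :: t) (-1) ([] : List (Int × Int))
      = PySem.List.pyGetD (h :: t) (-1) ([] : List (Int × Int)) := by
    rw [PySem.List.pyGetD_neg_one _ _ h1, PySem.List.pyGetD_neg_one _ _ h2]
    exact List.getLast_cons h2
  rw [hlast]
  by_cases hc : (PySem.List.pyGetD r (-1) ((0 : Int), (0 : Int))).2 <
      (PySem.List.pyGetD h 0 ((0 : Int), (0 : Int))).2 + 30
  · rw [List.filter_cons_of_pos (by simpa using hc)]
    by_cases hl : r.length > 4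
    · simp [hc, hl]
    · simp [hc, hl]
  · rw [List.filter_cons_of_neg (by simpa using hc)]
    simp [hc]

-- the bridge: A's staged phases on the run list equal B's fused pass
lemma pv_bridge :
    ∀ (row : List (Int × Int)) (l : List (Int × Int)),
    pvFinish (pvRuns row l) = pvFused row l := by
  intro row l
  induction row, l using pvRuns.induct with
  | case1 row =>
    rw [pvRuns_nil, pvFused]
    decide
  | case2 row x =>
    rw [pvRuns_one, pvFused_one]
    decide
  | case3 row a b hs =>
    rw [pvRuns_cons, if_pos hs, if_pos rfl, pv_finish_singleton,
      pvFused_cons, if_pos hs, if_pos rfl]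
  | case4 row a b rest hs hr ih =>
    rw [pvRuns_cons, if_pos hs, if_neg hr, pvFused_cons, if_pos hs, if_neg hr]
    exact ih
  | case5 row a b rest hs ih =>
    rcases rest with _ | ⟨c, t⟩
    · -- break at the last transition: the run is the last row, kept without the +30 test
      rw [pvRuns_cons, if_neg hs, pvRuns_one, pvFused_cons, if_neg hs, pvFused_one,
        pv_finish_singleton]
      simp
    · -- break with more points to come: the next run starts with b
      obtain ⟨s, rs, hshape⟩ := pv_runs_shape t [] b c
      rw [pvRuns_cons, if_neg hs, pvFused_cons, if_neg hs, hshape]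
      rw [hshape] at ih
      rw [pv_finish_cons, ih]
      rw [PySem.List.pyGetD_neg_one_append_singleton]
      have hhead : PySem.List.pyGetD (([] : List (Int × Int)) ++ b :: s) 0 ((0 : Int), (0 : Int)) = b := by
        simp [PySem.List.pyGetD_zero_cons]
      rw [hhead]
      simp

-- ===== VERDICT (by name: the statement is the Claim_ definition above) =====
theorem smoothBottomBorder_spec : Claim_equal_smoothBottomBorder := by
  intro border _ _
  unfold Spec_smoothBottomBorder
  rw [pv_A_eval, pv_B_eval, pv_bridge]
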